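-- pv_equiv track=rewrite | github.com/rrwt/daily-coding-challenge | daily_problems/problem_0_to_100/problem_34.py | lexicographic_palindrome
-- ===== SOURCE A (Python) =====
-- def lexicographic_palindrome(text: str, start: int = -1, end: int = -1) -> str:
--     if not text:
--         return ""
--     if start == -1 and end == -1:
--         start, end = 0, len(text) - 1
--
--     if end < start:
--         return ""
--
--     if start == end:
--         return text[start]
--
--     if text[start] == text[end]:
--         return text[start] + lexicographic_palindrome(text, start+1, end-1) + text[end]
--
--     res_1 = text[start] + lexicographic_palindrome(text, start + 1, end) + text[start]
--     res_2 = text[end] + lexicographic_palindrome(text, start, end - 1) + text[end]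
--
--     if len(res_1) == len(res_2):
--         return res_1 if text[start] < text[end] else res_2
--     return res_1 if len(res_1) < len(res_2) else res_2
-- ===== SOURCE B (Python) =====
-- def lexicographic_palindrome(text: str, start: int = -1, end: int = -1) -> str:
--     # Bottom-up dynamic programming: fill a table over all sub-ranges
--     # [s..e] of [start..end] in increasing range width, so each cell is
--     # computed once from already-filled smaller cells (no recursion).
--     if not text:
--         return ""
--     if start == -1 and end == -1:
--         start, end = 0, len(text) - 1
--     if end < start:
--         return ""
--     dp = {}
--     for s in range(end, start - 1, -1):
--         for e in range(s, end + 1):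
--             if s == e:
--                 dp[(s, e)] = text[s]
--             else:
--                 a, b = text[s], text[e]
--                 if a == b:
--                     inner = dp[(s + 1, e - 1)] if s + 1 <= e - 1 else ""
--                     dp[(s, e)] = a + inner + b
--                 else:
--                     r1 = a + dp[(s + 1, e)] + a
--                     r2 = b + dp[(s, e - 1)] + b
--                     if len(r1) == len(r2):
--                         dp[(s, e)] = r1 if a < b else r2
--                     else:
--                         dp[(s, e)] = r1 if len(r1) < len(r2) else r2
--     return dp[(start, end)]
-- ===== Notes on version B (the rewrite author's own statement) =====
-- stated objective: faster
-- what changed: Replaces the naive recursion by bottom-up dynamic programming: two nested loops fill a table dp[(s,e)] over all sub-ranges of [start..end] in increasing width, each cell computed once from smaller cells, and the answer is read off at (start,end).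
-- outside the precondition, e.g. on lexicographic_palindrome('abc', -2, 0): A returns 'acbca', B returns 'abcba'
import Mathlib
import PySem

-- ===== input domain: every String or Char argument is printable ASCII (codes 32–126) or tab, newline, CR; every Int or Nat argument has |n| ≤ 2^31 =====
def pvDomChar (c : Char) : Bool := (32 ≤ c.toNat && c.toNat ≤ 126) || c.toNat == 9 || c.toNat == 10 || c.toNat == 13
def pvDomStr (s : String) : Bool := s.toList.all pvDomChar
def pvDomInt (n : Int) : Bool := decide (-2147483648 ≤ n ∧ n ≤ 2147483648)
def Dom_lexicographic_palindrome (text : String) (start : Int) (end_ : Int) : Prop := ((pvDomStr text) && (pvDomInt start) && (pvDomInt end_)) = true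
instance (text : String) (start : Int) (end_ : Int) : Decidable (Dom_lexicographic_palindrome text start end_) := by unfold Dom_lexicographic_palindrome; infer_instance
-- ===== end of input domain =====

-- B replaces A's naive recursion by bottom-up dynamic programming (two nested loops
-- filling a table over sub-ranges, each cell computed once); equal return values are
-- proved on Pre_.

-- termination helper for port A's well-founded recursion (cited in decreasing_by)
lemma pvFdec (L : Nat) (s e s' e' : Int) (h1 : s ≤ s') (h2 : e' - s' < e - s) (h3 : 0 < e - s) :
    (e' - s').toNat + (if s' < 0 then 2 * L + 2 else 0) <
      (e - s).toNat + (if s < 0 then 2 * L + 2 else 0) := by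
  split_ifs <;> omega

-- ===== PORT A =====
-- A's recursion on the character list; the Python reassignment 'start, end = 0, len-1'
-- (taken exactly when start == -1 and end == -1) is ported as the tail call with those values.
-- Where Python raises IndexError (pyGet? = none) this returns [] (those inputs are outside Pre_).
def pvLpA (cs : List Char) (s e : Int) : List Char :=
  if cs = [] then []
  else if s = -1 ∧ e = -1 then pvLpA cs 0 ((cs.length : Int) - 1)
  else if e < s then []
  else if s = e then (match PySem.List.pyGet? cs s with | some c => [c] | none => [])
  else match PySem.List.pyGet? cs s, PySem.List.pyGet? cs e with
    | some a, some b =>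
      if a = b then a :: (pvLpA cs (s + 1) (e - 1) ++ [b])
      else
        let r1 := a :: (pvLpA cs (s + 1) e ++ [a])
        let r2 := b :: (pvLpA cs s (e - 1) ++ [b])
        if r1.length = r2.length then (if a < b then r1 else r2)
        else if r1.length < r2.length then r1 else r2
    | _, _ => []
termination_by ((e - s).toNat + (if s < 0 then 2 * cs.length + 2 else 0))
decreasing_by
  · simp_wf; first | omega | (split_ifs <;> omega)
  · exact pvFdec cs.length s e (s + 1) (e - 1) (by omega) (by omega) (by omega)
  · exact pvFdec cs.length s e (s + 1) e (by omega) (by omega) (by omega)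
  · exact pvFdec cs.length s e s (e - 1) (by omega) (by omega) (by omega)

def lexicographic_palindrome (text : String) (start : Int) (end_ : Int) : String :=
  String.ofList (pvLpA text.toList start end_)

-- ===== PORT B =====
-- one table cell of B's bottom-up DP (the loop body computing dp[(s, e)]).
-- Python's raising lookups dp[(s+1, e)] etc. are ported as .get? ….getD []: inside
-- Pre_ those keys are always present when the body runs, so the default is never used.
def pvCell (cs : List Char) (d : PySem.Dict (Int × Int) (List Char)) (s e : Int) : List Char :=
  if s = e then (match PySem.List.pyGet? cs s with | some c => [c] | none => [])
  else match PySem.List.pyGet? cs s, PySem.List.pyGet? cs e with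
    | some a, some b =>
      if a = b then a :: ((if s + 1 ≤ e - 1 then ((d.get? (s + 1, e - 1)).getD []) else []) ++ [b])
      else
        let r1 := a :: ((d.get? (s + 1, e)).getD [] ++ [a])
        let r2 := b :: ((d.get? (s, e - 1)).getD [] ++ [b])
        if r1.length = r2.length then (if a < b then r1 else r2)
        else if r1.length < r2.length then r1 else r2
    | _, _ => []

-- the two nested loops: for s in range(end, start-1, -1): for e in range(s, end+1): dp[(s,e)] = …
def pvFill (cs : List Char) (start end_ : Int) : PySem.Dict (Int × Int) (List Char) :=
  (PySem.List.pyRange end_ (start - 1) (-1)).foldl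
    (fun d s => (PySem.List.pyRange s (end_ + 1) 1).foldl
      (fun d e => d.insert (s, e) (pvCell cs d s e)) d)
    PySem.Dict.empty

-- check 'end < start', run the two loops, read off dp[(start, end)]
def pvAnswer (cs : List Char) (s0 e0 : Int) : String :=
  if e0 < s0 then "" else String.ofList (((pvFill cs s0 e0).get? (s0, e0)).getD [])

-- the Python reassignment 'start, end = 0, len(text) - 1' on the (-1, -1) default
def lexicographic_palindrome_alt (text : String) (start : Int) (end_ : Int) : String :=
  if text.toList = [] then ""
  else if start = -1 ∧ end_ = -1 then pvAnswer text.toList 0 ((text.toList.length : Int) - 1)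
  else pvAnswer text.toList start end_

-- ===== PRECONDITION & SPEC =====
-- Pre_ admits: empty text, the (-1, -1) default, an empty range end_ < start, and
-- front indices 0 ≤ start ≤ end_ < len.  It EXCLUDES explicit negative indices (on
-- which A still returns): -1 doubles as A's default sentinel, so a subproblem that
-- reaches (start, end) = (-1, -1) silently restarts on the WHOLE string — A's value
-- on explicit negative indices is an artefact of that sentinel collision, while B
-- indexes from the front (see the cite in claim.json).
def Pre_lexicographic_palindrome (text : String) (start : Int) (end_ : Int) : Prop :=
  text.toList = [] ∨ (start = -1 ∧ end_ = -1) ∨ end_ < start ∨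
    (0 ≤ start ∧ start ≤ end_ ∧ end_ < (text.toList.length : Int))
instance (text : String) (start : Int) (end_ : Int) : Decidable (Pre_lexicographic_palindrome text start end_) := by unfold Pre_lexicographic_palindrome; infer_instance

def pvWitness_lexicographic_palindrome : String × Int × Int := ("abcab", -1, -1)

def Spec_lexicographic_palindrome (text : String) (start : Int) (end_ : Int) (out : String) : Prop := out = lexicographic_palindrome_alt text start end_
instance (text : String) (start : Int) (end_ : Int) (out : String) : Decidable (Spec_lexicographic_palindrome text start end_ out) := by unfold Spec_lexicographic_palindrome; infer_instance

-- ===== CLAIM (what is proved, stated in full; the proofs are below) =====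
def Claim_equal_lexicographic_palindrome : Prop := ∀ (text : String) (start : Int) (end_ : Int), Dom_lexicographic_palindrome text start end_ → Pre_lexicographic_palindrome text start end_ → Spec_lexicographic_palindrome text start end_ (lexicographic_palindrome text start end_)

-- ===== LEMMAS AND PROOFS =====

-- "d is exactly the table of A's values on the cells satisfying P"
def pvTab (cs : List Char) (P : Int → Int → Bool) (d : PySem.Dict (Int × Int) (List Char)) : Prop :=
  ∀ s e : Int, d.get? (s, e) = if P s e then some (pvLpA cs s e) else none

-- cells filled after the inner loop of row s has processed columns < E (rows > s complete)
def pvPb (end_ s E : Int) : Int → Int → Bool :=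
  fun s' e' => decide (s ≤ s' ∧ s' ≤ e' ∧ e' ≤ end_ ∧ (s < s' ∨ e' < E))

-- cells filled once all rows ≥ t are complete
def pvFull (end_ t : Int) : Int → Int → Bool :=
  fun s' e' => decide (t ≤ s' ∧ s' ≤ e' ∧ e' ≤ end_)

lemma pvTab_congr (cs : List Char) (P Q : Int → Int → Bool)
    (d : PySem.Dict (Int × Int) (List Char)) (h : ∀ s e, P s e = Q s e)
    (hd : pvTab cs P d) : pvTab cs Q d := by
  intro s e
  rw [← h s e]
  exact hd s e

-- unfolding A once on a front cell 0 ≤ s ≤ e (no sentinel, no empty range)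
lemma pvLpA_front (cs : List Char) (s e : Int) (hcs : cs ≠ []) (h0 : 0 ≤ s) (hse : s ≤ e) :
    pvLpA cs s e =
      if s = e then (match PySem.List.pyGet? cs s with | some c => [c] | none => [])
      else match PySem.List.pyGet? cs s, PySem.List.pyGet? cs e with
        | some a, some b =>
          if a = b then a :: (pvLpA cs (s + 1) (e - 1) ++ [b])
          else
            let r1 := a :: (pvLpA cs (s + 1) e ++ [a])
            let r2 := b :: (pvLpA cs s (e - 1) ++ [b])
            if r1.length = r2.length then (if a < b then r1 else r2)
            else if r1.length < r2.length then r1 else r2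
        | _, _ => [] := by
  rw [pvLpA.eq_def]
  rw [if_neg hcs, if_neg (by omega), if_neg (by omega)]

-- the loop body computes A's value for its cell from the already-filled table
lemma pvCell_correct (cs : List Char) (end_ s e : Int) (d : PySem.Dict (Int × Int) (List Char))
    (hcs : cs ≠ []) (h0 : 0 ≤ s) (hse : s ≤ e) (he : e ≤ end_)
    (hd : pvTab cs (pvPb end_ s e) d) :
    pvCell cs d s e = pvLpA cs s e := by
  rw [pvLpA_front cs s e hcs h0 hse, pvCell]
  by_cases hseq : s = e
  · rw [if_pos hseq, if_pos hseq]
  · rw [if_neg hseq, if_neg hseq]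
    have hlt : s < e := by omega
    rcases ha : PySem.List.pyGet? cs s with _ | a <;> rcases hb : PySem.List.pyGet? cs e with _ | b
    · rfl
    · rfl
    · rfl
    · dsimp only []
      have h1 : d.get? (s + 1, e) = some (pvLpA cs (s + 1) e) := by
        rw [hd (s + 1) e, if_pos]
        unfold pvPb; simp only [decide_eq_true_eq]; omega
      have h2 : d.get? (s, e - 1) = some (pvLpA cs s (e - 1)) := by
        rw [hd s (e - 1), if_pos]
        unfold pvPb; simp only [decide_eq_true_eq]; omega
      by_cases hab : a = b
      · rw [if_pos hab, if_pos hab]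
        by_cases hin : s + 1 ≤ e - 1
        · have h3 : d.get? (s + 1, e - 1) = some (pvLpA cs (s + 1) (e - 1)) := by
            rw [hd (s + 1) (e - 1), if_pos]
            unfold pvPb; simp only [decide_eq_true_eq]; omega
          rw [if_pos hin, h3]
          rfl
        · have h3 : pvLpA cs (s + 1) (e - 1) = [] := by
            rw [pvLpA.eq_def, if_neg hcs, if_neg (by omega), if_pos (by omega)]
          rw [if_neg hin, h3]
      · rw [if_neg hab, if_neg hab]
        simp only [h1, h2, Option.getD_some]

-- inner loop: finishing row s (columns from E up to end_) completes all rows ≥ s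
lemma pvInner (cs : List Char) (end_ s : Int) (hcs : cs ≠ []) (h0 : 0 ≤ s) :
    ∀ (k : Nat) (E : Int) (d : PySem.Dict (Int × Int) (List Char)),
      s ≤ E → E ≤ end_ + 1 → (end_ + 1 - E).toNat = k → pvTab cs (pvPb end_ s E) d →
      pvTab cs (pvPb end_ s (end_ + 1))
        ((PySem.List.pyRange E (end_ + 1) 1).foldl (fun d e => d.insert (s, e) (pvCell cs d s e)) d) := by
  intro k
  induction k with
  | zero =>
    intro E d hsE hE hk hd
    have hEe : E = end_ + 1 := by omega
    subst hEe
    rw [PySem.List.pyRange_one_eq_nil (by omega)]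
    exact hd
  | succ k ih =>
    intro E d hsE hE hk hd
    have hElt : E < end_ + 1 := by omega
    rw [PySem.List.pyRange_one_cons hElt, List.foldl_cons]
    apply ih (E + 1) _ (by omega) (by omega) (by omega)
    intro s' e'
    rw [PySem.Dict.get?_insert]
    by_cases hk' : (s', e') = (s, E)
    · rw [if_pos hk']
      obtain ⟨hs', he'⟩ := Prod.mk.injEq .. ▸ hk'
      have : pvPb end_ s (E + 1) s' e' = true := by
        unfold pvPb; simp only [decide_eq_true_eq]; omega
      rw [this, if_pos rfl,
        pvCell_correct cs end_ s E d hcs h0 hsE (by omega) hd, hs', he']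
    · rw [if_neg hk']
      rw [hd s' e']
      have : pvPb end_ s (E + 1) s' e' = pvPb end_ s E s' e' := by
        unfold pvPb
        have hne : ¬(s' = s ∧ e' = E) := by
          intro ⟨h1, h2⟩; exact hk' (by rw [h1, h2])
        by_cases hc : s = s' <;> simp only [decide_eq_decide] <;> constructor <;> intro <;> omega
      rw [this]

-- outer loop: processing rows S down to start completes all rows ≥ start
lemma pvOuter (cs : List Char) (start end_ : Int) (hcs : cs ≠ []) (h0 : 0 ≤ start) :
    ∀ (k : Nat) (S : Int) (d : PySem.Dict (Int × Int) (List Char)),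
      start - 1 ≤ S → S ≤ end_ → (S - (start - 1)).toNat = k → pvTab cs (pvFull end_ (S + 1)) d →
      pvTab cs (pvFull end_ start)
        ((PySem.List.pyRange S (start - 1) (-1)).foldl
          (fun d s => (PySem.List.pyRange s (end_ + 1) 1).foldl
            (fun d e => d.insert (s, e) (pvCell cs d s e)) d) d) := by
  intro k
  induction k with
  | zero =>
    intro S d h1 h2 hk hd
    have hS : S = start - 1 := by omega
    subst hS
    rw [PySem.List.pyRange_neg_one_eq_nil (by omega)]
    apply pvTab_congr cs _ _ d _ hd
    intro s e
    unfold pvFull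
    simp only [decide_eq_decide]
    omega
  | succ k ih =>
    intro S d h1 h2 hk hd
    have hSgt : start - 1 < S := by omega
    rw [PySem.List.pyRange_neg_one_cons hSgt, List.foldl_cons]
    apply ih (S - 1) _ (by omega) (by omega) (by omega)
    have hrow := pvInner cs end_ S hcs (by omega) ((end_ + 1 - S).toNat) S d (by omega) (by omega) rfl
      (by
        apply pvTab_congr cs _ _ d _ hd
        intro s e
        unfold pvFull pvPb
        simp only [decide_eq_decide]
        omega)
    apply pvTab_congr cs _ _ _ _ hrow
    intro s e
    unfold pvFull pvPb
    simp only [decide_eq_decide]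
    omega

-- the filled table holds A's value at its top cell
lemma pvFill_get (cs : List Char) (s0 e0 : Int) (hcs : cs ≠ []) (h0 : 0 ≤ s0) (hse : s0 ≤ e0) :
    ((pvFill cs s0 e0).get? (s0, e0)).getD [] = pvLpA cs s0 e0 := by
  have hempty : pvTab cs (pvFull e0 (e0 + 1)) PySem.Dict.empty := by
    intro s e
    rw [if_neg]
    · exact rfl
    · unfold pvFull; simp only [decide_eq_true_eq]; omega
  have h := pvOuter cs s0 e0 hcs h0 ((e0 - (s0 - 1)).toNat) e0 PySem.Dict.empty
    (by omega) (by omega) rfl hempty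
  unfold pvFill
  rw [h s0 e0, if_pos]
  · rfl
  · unfold pvFull; simp only [decide_eq_true_eq]; omega

-- ===== VERDICT (by name: the statement is the Claim_ definition above) =====
theorem lexicographic_palindrome_spec : Claim_equal_lexicographic_palindrome := by
  intro text start end_ _ hpre
  unfold Spec_lexicographic_palindrome lexicographic_palindrome lexicographic_palindrome_alt
  by_cases hcs : text.toList = []
  · rw [pvLpA.eq_def, if_pos hcs, if_pos hcs]
  · rw [if_neg hcs]
    by_cases hdef : start = -1 ∧ end_ = -1
    · obtain ⟨hs, he⟩ := hdef
      subst hs he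
      have hn : (1 : Int) ≤ (text.toList.length : Int) := by
        have := List.length_pos_iff.mpr hcs
        omega
      rw [if_pos (⟨rfl, rfl⟩ : (-1 : Int) = -1 ∧ (-1 : Int) = -1)]
      unfold pvAnswer
      rw [if_neg (by omega : ¬((text.toList.length : Int) - 1 < (0 : Int)))]
      rw [pvLpA.eq_def, if_neg hcs, if_pos ⟨rfl, rfl⟩]
      rw [pvFill_get text.toList 0 ((text.toList.length : Int) - 1) hcs (by omega) (by omega)]
    · rw [if_neg hdef]
      unfold pvAnswer
      rcases hpre with h | h | h | h
      · exact absurd h hcs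
      · exact absurd h hdef
      · -- end_ < start: both return ""
        rw [if_pos h, pvLpA.eq_def, if_neg hcs, if_neg hdef, if_pos h]
      · obtain ⟨h0, hse, hn⟩ := h
        rw [if_neg (by omega : ¬(end_ < start))]
        rw [pvFill_get text.toList start end_ hcs h0 hse]
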